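-- pv_equiv track=rewrite | github.com/Eurus-J-Zhang/ProjectExperience | Artificial Intelligence/02_SearchMethod_ImplementingA*/MAPP.py | createMAPPgrid
-- ===== SOURCE A (Python) =====
-- def createMAPPgrid(ss):
--     xsize = len(ss[0])
--     ysize = len(ss)
--     maxAgent = 0
--
--     for s in ss: # Iterate over lines
--         for c in s: # Iterate over chars on one line
--             if '1' <= c and c <= '9':
--                 maxAgent = max(maxAgent,ord(c) - ord('1') + 1)
--
--     initlocations = [ (0,0) for x in range(0,maxAgent) ]
--
--     walls = []
--     y = ysize
--     for s in ss: # Iterate over lines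
--         y = y-1
--         x = -1
--         for c in s: # Iterate over chars on one line
--             x = x + 1
--             if '1' <= c and c <= '9':
--                 initlocations[ord(c)-ord('1')] = (x,y)
--             if c == '#':
--                 walls = walls + [(x,y)]
--
--     return (initlocations,xsize,ysize,walls)
-- ===== SOURCE B (Python) =====
-- def createMAPPgrid(ss):
--     ysize = len(ss)
--     xsize = len(ss[0])
--     agents = {}
--     walls = []
--     for i, s in enumerate(ss):
--         y = ysize - 1 - i
--         for x, c in enumerate(s):
--             if '1' <= c <= '9':
--                 agents[ord(c) - ord('1')] = (x, y)
--             elif c == '#':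
--                 walls.append((x, y))
--     maxAgent = max(agents.keys(), default=-1) + 1
--     initlocations = [agents.get(i, (0, 0)) for i in range(maxAgent)]
--     return (initlocations, xsize, ysize, walls)
-- ===== Notes on version B (the rewrite author's own statement) =====
-- stated objective: alternative
-- what changed: Replaces A's two full grid passes (a max-agent scan, then in-place assignments into a preallocated (0,0) list) with a single pass that builds an agent-number->location dict and the wall list together, then assembles the location list from the dict at the end.
import Mathlib
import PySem

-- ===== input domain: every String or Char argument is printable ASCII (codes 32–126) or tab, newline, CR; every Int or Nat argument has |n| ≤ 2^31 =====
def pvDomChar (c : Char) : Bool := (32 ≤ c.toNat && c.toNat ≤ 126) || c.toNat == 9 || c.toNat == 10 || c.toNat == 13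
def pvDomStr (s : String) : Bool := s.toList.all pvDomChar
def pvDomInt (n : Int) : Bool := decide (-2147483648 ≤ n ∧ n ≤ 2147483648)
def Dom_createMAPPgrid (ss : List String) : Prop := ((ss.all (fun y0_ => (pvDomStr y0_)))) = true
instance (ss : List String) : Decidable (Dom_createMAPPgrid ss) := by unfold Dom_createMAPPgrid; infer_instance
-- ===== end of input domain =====

-- B replaces A's two full grid passes (max-agent scan, then in-place fills of a preallocated
-- list) by a single pass building an agent→location dict plus the wall list, then assembles
-- the location list from the dict; objective: alternative decomposition, same asymptotic cost.

-- ===== PORT A =====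
def createMAPPgrid (ss : List String) : (List (Int × Int)) × Int × Int × (List (Int × Int)) :=
  let xsize : Int := PySem.Str.len (PySem.List.pyGetD ss 0 "")
  let ysize : Int := (ss.length : Int)
  let maxAgent : Int := ss.foldl (fun m s => s.toList.foldl (fun m c =>
      if '1' ≤ c ∧ c ≤ '9' then max m ((c.toNat : Int) - ('1'.toNat : Int) + 1) else m) m) 0
  let initlocations : List (Int × Int) := (PySem.List.pyRange 0 maxAgent 1).map (fun _ => ((0 : Int), (0 : Int)))
  let fin := ss.foldl (fun (st : List (Int × Int) × List (Int × Int) × Int) s =>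
      let y := st.2.2 - 1
      let inner := s.toList.foldl (fun (st2 : List (Int × Int) × List (Int × Int) × Int) c =>
          let x := st2.2.2 + 1
          let locs := if '1' ≤ c ∧ c ≤ '9' then st2.1.set (c.toNat - '1'.toNat) (x, y) else st2.1
          let walls := if c = '#' then st2.2.1 ++ [(x, y)] else st2.2.1
          (locs, walls, x)) (st.1, st.2.1, (-1 : Int))
      (inner.1, inner.2.1, y)) (initlocations, ([] : List (Int × Int)), ysize)
  (fin.1, xsize, ysize, fin.2.1)

-- ===== PORT B =====
def createMAPPgrid_alt (ss : List String) : (List (Int × Int)) × Int × Int × (List (Int × Int)) :=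
  let ysize : Int := (ss.length : Int)
  let xsize : Int := PySem.Str.len (PySem.List.pyGetD ss 0 "")
  let st := (PySem.List.enumerate ss 0).foldl
      (fun (st : PySem.Dict Int (Int × Int) × List (Int × Int)) is =>
        let y : Int := ysize - 1 - is.1
        (PySem.List.enumerate is.2.toList 0).foldl (fun st2 xc =>
          if '1' ≤ xc.2 ∧ xc.2 ≤ '9' then
            (st2.1.insert ((xc.2.toNat : Int) - ('1'.toNat : Int)) (xc.1, y), st2.2)
          else if xc.2 = '#' then (st2.1, st2.2 ++ [(xc.1, y)])
          else st2) st)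
      (PySem.Dict.empty, ([] : List (Int × Int)))
  let maxAgent : Int := (PySem.List.max? st.1.keys (fun k => k)).getD (-1) + 1
  let initlocations := (PySem.List.pyRange 0 maxAgent 1).map (fun i => st.1.getD i (0, 0))
  (initlocations, xsize, ysize, st.2)


-- ===== PRECONDITION & SPEC =====
-- Pre_ excludes only the empty list, on which the Python A raises IndexError at ss[0] (B raises there too).
def Pre_createMAPPgrid (ss : List String) : Prop := ss ≠ []
instance (ss : List String) : Decidable (Pre_createMAPPgrid ss) := by unfold Pre_createMAPPgrid; infer_instance
def pvWitness_createMAPPgrid : List String := ["1#.", ".2."]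

def Spec_createMAPPgrid (ss : List String) (out : (List (Int × Int)) × Int × Int × (List (Int × Int))) : Prop := out = createMAPPgrid_alt ss
instance (ss : List String) (out : (List (Int × Int)) × Int × Int × (List (Int × Int))) : Decidable (Spec_createMAPPgrid ss out) := by unfold Spec_createMAPPgrid; infer_instance

-- ===== CLAIM (what is proved, stated in full; the proofs are below) =====
def Claim_equal_createMAPPgrid : Prop := ∀ (ss : List String), Dom_createMAPPgrid ss → Pre_createMAPPgrid ss → Spec_createMAPPgrid ss (createMAPPgrid ss)

-- ===== LEMMAS AND PROOFS =====
-- ==== proof helpers ====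
def pvView (n : Nat) (d : PySem.Dict Int (Int × Int)) : List (Int × Int) :=
  (List.range n).map (fun (i : Nat) => d.getD (i : Int) (0, 0))

def pvM (l : List Int) : Int := (PySem.List.max? l (fun k => k)).getD (-1)

def pvFAmax (m : Int) (c : Char) : Int :=
  if '1' ≤ c ∧ c ≤ '9' then max m ((c.toNat : Int) - ('1'.toNat : Int) + 1) else m

def pvFAin (y : Int) (st2 : List (Int × Int) × List (Int × Int) × Int) (c : Char) :
    List (Int × Int) × List (Int × Int) × Int :=
  let x := st2.2.2 + 1
  let locs := if '1' ≤ c ∧ c ≤ '9' then st2.1.set (c.toNat - '1'.toNat) (x, y) else st2.1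
  let walls := if c = '#' then st2.2.1 ++ [(x, y)] else st2.2.1
  (locs, walls, x)

def pvFAout (st : List (Int × Int) × List (Int × Int) × Int) (s : String) :
    List (Int × Int) × List (Int × Int) × Int :=
  let y := st.2.2 - 1
  let inner := s.toList.foldl (pvFAin y) (st.1, st.2.1, (-1 : Int))
  (inner.1, inner.2.1, y)

def pvFBin (y : Int) (st2 : PySem.Dict Int (Int × Int) × List (Int × Int)) (xc : Int × Char) :
    PySem.Dict Int (Int × Int) × List (Int × Int) :=
  if '1' ≤ xc.2 ∧ xc.2 ≤ '9' then
    (st2.1.insert ((xc.2.toNat : Int) - ('1'.toNat : Int)) (xc.1, y), st2.2)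
  else if xc.2 = '#' then (st2.1, st2.2 ++ [(xc.1, y)])
  else st2

def pvFBout (Y : Int) (st : PySem.Dict Int (Int × Int) × List (Int × Int)) (is : Int × String) :
    PySem.Dict Int (Int × Int) × List (Int × Int) :=
  (PySem.List.enumerate is.2.toList 0).foldl (pvFBin (Y - 1 - is.1)) st

theorem portA_eq (ss : List String) :
    createMAPPgrid ss =
      (let fin := ss.foldl pvFAout
          ((PySem.List.pyRange 0 (ss.foldl (fun m s => s.toList.foldl pvFAmax m) 0) 1).map
              (fun _ => ((0 : Int), (0 : Int))),
            ([] : List (Int × Int)), (ss.length : Int));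
        (fin.1, PySem.Str.len (PySem.List.pyGetD ss 0 ""), (ss.length : Int), fin.2.1)) := rfl

theorem portB_eq (ss : List String) :
    createMAPPgrid_alt ss =
      (let st := (PySem.List.enumerate ss 0).foldl (pvFBout (ss.length : Int))
          (PySem.Dict.empty, ([] : List (Int × Int)));
        ((PySem.List.pyRange 0 (pvM st.1.keys + 1) 1).map (fun i => st.1.getD i (0, 0)),
          PySem.Str.len (PySem.List.pyGetD ss 0 ""), (ss.length : Int), st.2)) := rfl

theorem pvCharLB (c : Char) (h : '1' ≤ c) : 49 ≤ c.toNat := by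
  simp [Char.le_def] at h; exact h

theorem pvHashNe (c : Char) (h : '1' ≤ c) : c ≠ '#' := by
  rintro rfl; revert h; decide

theorem pvCast (c : Char) (h : '1' ≤ c) :
    ((c.toNat - '1'.toNat : Nat) : Int) = (c.toNat : Int) - ('1'.toNat : Int) := by
  have h1 : '1'.toNat = 49 := rfl
  have := pvCharLB c h
  rw [h1]; omega

theorem pvView_set (n : Nat) (d : PySem.Dict Int (Int × Int)) (k : Nat) (v : Int × Int) :
    (pvView n d).set k v = pvView n (d.insert (k : Int) v) := by
  unfold pvView
  apply List.ext_getElem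
  · simp
  intro i h1 h2
  rw [List.getElem_set]
  simp only [List.getElem_map, List.getElem_range, PySem.Dict.getD_insert]
  by_cases hik : k = i
  · simp [hik]
  · rw [if_neg hik, if_neg (by intro h; exact hik (by exact_mod_cast h.symm))]

theorem pvM_append (l : List Int) (k : Int) (hk : 0 ≤ k) :
    pvM (l ++ [k]) = max (pvM l) k := by
  unfold pvM
  cases l with
  | nil =>
      rw [List.nil_append, PySem.List.max?_id_cons,
        show (PySem.List.max? ([] : List Int) (fun k => k)) = none from rfl]
      simp; omega
  | cons h t =>
      rw [List.cons_append, PySem.List.max?_id_cons, PySem.List.max?_id_cons]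
      simp [List.foldl_append]

theorem pvM_mem_le (l : List Int) (k : Int) (h : k ∈ l) : k ≤ pvM l := by
  unfold pvM
  cases e : PySem.List.max? l (fun k => k) with
  | none => rw [PySem.List.max?_eq_none_iff] at e; subst e; cases h
  | some m => simpa using PySem.List.max?_isMax e k h

theorem pvInnerMax (y : Int) (cs : List Char) : ∀ (j m : Int) (d : PySem.Dict Int (Int × Int))
    (w : List (Int × Int)), m = pvM d.keys + 1 →
    cs.foldl pvFAmax m = pvM (((PySem.List.enumerate cs j).foldl (pvFBin y) (d, w)).1).keys + 1 := by
  induction cs with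
  | nil => intro j m d w h; simpa [PySem.List.enumerate_nil] using h
  | cons c cs ih =>
      intro j m d w h
      rw [PySem.List.enumerate_cons]
      simp only [List.foldl_cons]
      by_cases hd : '1' ≤ c ∧ c ≤ '9'
      · rw [show pvFAmax m c = max m ((c.toNat : Int) - ('1'.toNat : Int) + 1) from by
            simp [pvFAmax, hd],
          show pvFBin y (d, w) (j, c) =
              (d.insert ((c.toNat : Int) - ('1'.toNat : Int)) (j, y), w) from by
            simp [pvFBin, hd]]
        apply ih
        have hk0 : (0 : Int) ≤ (c.toNat : Int) - ('1'.toNat : Int) := by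
          have := pvCharLB c hd.1
          have h1 : '1'.toNat = 49 := rfl
          rw [h1]; omega
        by_cases hc : d.contains ((c.toNat : Int) - ('1'.toNat : Int))
        · rw [PySem.Dict.keys_insert_of_contains d _ hc, h]
          have hmem : ((c.toNat : Int) - ('1'.toNat : Int)) ∈ d.keys :=
            (PySem.Dict.contains_iff_mem_keys _ _).mp hc
          have := pvM_mem_le d.keys _ hmem
          rw [max_eq_left (by omega)]
        · rw [PySem.Dict.keys_insert_of_not_contains d _ (by simpa using hc), pvM_append _ _ hk0, h,
            ← max_add_add_right]
      · rw [show pvFAmax m c = m from by simp [pvFAmax, hd],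
          show pvFBin y (d, w) (j, c) = (d, if c = '#' then w ++ [(j, y)] else w) from by
            by_cases hh : c = '#' <;> simp [pvFBin, hd, hh]]
        exact ih _ _ _ _ h

theorem pvOuterMax (Y : Int) (ss : List String) : ∀ (j m : Int) (d : PySem.Dict Int (Int × Int))
    (w : List (Int × Int)), m = pvM d.keys + 1 →
    ss.foldl (fun m s => s.toList.foldl pvFAmax m) m
      = pvM (((PySem.List.enumerate ss j).foldl (pvFBout Y) (d, w)).1).keys + 1 := by
  induction ss with
  | nil => intro j m d w h; simpa [PySem.List.enumerate_nil] using h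
  | cons s ss ih =>
      intro j m d w h
      rw [PySem.List.enumerate_cons]
      simp only [List.foldl_cons]
      have hstep := pvInnerMax (Y - 1 - j) s.toList 0 m d w h
      have := ih (j + 1) (s.toList.foldl pvFAmax m)
        (pvFBout Y (d, w) (j, s)).1 (pvFBout Y (d, w) (j, s)).2 (by rw [hstep]; rfl)
      simpa using this

theorem pvInnerLoc (n : Nat) (y : Int) (cs : List Char) : ∀ (j xA : Int)
    (locs w : List (Int × Int)) (d : PySem.Dict Int (Int × Int)),
    xA = j - 1 → locs = pvView n d →
    (cs.foldl (pvFAin y) (locs, w, xA)).1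
        = pvView n ((PySem.List.enumerate cs j).foldl (pvFBin y) (d, w)).1
    ∧ (cs.foldl (pvFAin y) (locs, w, xA)).2.1
        = ((PySem.List.enumerate cs j).foldl (pvFBin y) (d, w)).2 := by
  induction cs with
  | nil => intro j xA locs w d hx h; simp [PySem.List.enumerate_nil, h]
  | cons c cs ih =>
      intro j xA locs w d hx h
      rw [PySem.List.enumerate_cons]
      simp only [List.foldl_cons]
      by_cases hd : '1' ≤ c ∧ c ≤ '9'
      · rw [show pvFAin y (locs, w, xA) c = (locs.set (c.toNat - '1'.toNat) (j, y), w, j) from by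
            simp [pvFAin, hd, hx, pvHashNe c hd.1],
          show pvFBin y (d, w) (j, c) =
              (d.insert ((c.toNat : Int) - ('1'.toNat : Int)) (j, y), w) from by
            simp [pvFBin, hd]]
        exact ih (j + 1) j _ w _ (by ring)
          (by rw [h, pvView_set, pvCast c hd.1])
      · rw [show pvFAin y (locs, w, xA) c = (locs, if c = '#' then w ++ [(j, y)] else w, j) from by
            by_cases hh : c = '#' <;> simp [pvFAin, hd, hh, hx],
          show pvFBin y (d, w) (j, c) = (d, if c = '#' then w ++ [(j, y)] else w) from by
            by_cases hh : c = '#' <;> simp [pvFBin, hd, hh]]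
        exact ih (j + 1) j _ _ _ (by ring) h

theorem pvOuterLoc (n : Nat) (Y : Int) (ss : List String) : ∀ (j z : Int)
    (locs w : List (Int × Int)) (d : PySem.Dict Int (Int × Int)),
    z = Y - j → locs = pvView n d →
    (ss.foldl pvFAout (locs, w, z)).1
        = pvView n ((PySem.List.enumerate ss j).foldl (pvFBout Y) (d, w)).1
    ∧ (ss.foldl pvFAout (locs, w, z)).2.1
        = ((PySem.List.enumerate ss j).foldl (pvFBout Y) (d, w)).2 := by
  induction ss with
  | nil => intro j z locs w d hz h; simp [PySem.List.enumerate_nil, h]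
  | cons s ss ih =>
      intro j z locs w d hz h
      rw [PySem.List.enumerate_cons]
      simp only [List.foldl_cons]
      have hy : z - 1 = Y - 1 - j := by omega
      have hin := pvInnerLoc n (Y - 1 - j) s.toList 0 (-1) locs w d (by ring) h
      have hA : ss.foldl pvFAout (pvFAout (locs, w, z) s)
          = ss.foldl pvFAout
            ((s.toList.foldl (pvFAin (Y - 1 - j)) (locs, w, -1)).1,
             (s.toList.foldl (pvFAin (Y - 1 - j)) (locs, w, -1)).2.1, z - 1) := by
        rw [pvFAout]; rw [hy]
      rw [hA]
      have hB : pvFBout Y (d, w) (j, s)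
          = (PySem.List.enumerate s.toList 0).foldl (pvFBin (Y - 1 - j)) (d, w) := rfl
      rw [hin.2]
      have := ih (j + 1) (z - 1)
        ((s.toList.foldl (pvFAin (Y - 1 - j)) (locs, w, -1)).1)
        (((PySem.List.enumerate s.toList 0).foldl (pvFBin (Y - 1 - j)) (d, w)).2)
        (((PySem.List.enumerate s.toList 0).foldl (pvFBin (Y - 1 - j)) (d, w)).1)
        (by omega) hin.1
      rw [hB]
      simpa using this

theorem pvView_pyRange (m : Int) (d : PySem.Dict Int (Int × Int)) :
    (PySem.List.pyRange 0 m 1).map (fun i => d.getD i (0, 0)) = pvView m.toNat d := by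
  rw [PySem.List.pyRange_one]
  unfold pvView
  simp [List.map_map, Function.comp, zero_add]

theorem pvMain (ss : List String) : createMAPPgrid ss = createMAPPgrid_alt ss := by
  simp only [portA_eq, portB_eq]
  set Y : Int := (ss.length : Int) with hY
  set D := (PySem.List.enumerate ss 0).foldl (pvFBout Y)
      (PySem.Dict.empty, ([] : List (Int × Int))) with hD
  set mA := ss.foldl (fun (m : Int) (s : String) => s.toList.foldl pvFAmax m) 0 with hmA
  have hmax : mA = pvM D.1.keys + 1 :=
    pvOuterMax Y ss 0 0 PySem.Dict.empty [] (by decide)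
  have hinitA : (PySem.List.pyRange 0 mA 1).map (fun _ => ((0 : Int), (0 : Int)))
      = pvView mA.toNat PySem.Dict.empty := by
    rw [show (fun (_ : Int) => ((0 : Int), (0 : Int)))
        = (fun (i : Int) => (PySem.Dict.empty : PySem.Dict Int (Int × Int)).getD i (0, 0)) from
      funext fun i => (PySem.Dict.getD_empty i ((0 : Int), (0 : Int))).symm]
    exact pvView_pyRange mA PySem.Dict.empty
  have hloc := pvOuterLoc mA.toNat Y ss 0 Y
    ((PySem.List.pyRange 0 mA 1).map (fun _ => ((0 : Int), (0 : Int))))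
    [] PySem.Dict.empty (by ring) hinitA
  simp only [Prod.mk.injEq]
  refine ⟨?_, trivial, trivial, hloc.2⟩
  rw [hloc.1, ← hmax, pvView_pyRange]

-- ===== VERDICT (by name: the statement is the Claim_ definition above) =====
theorem createMAPPgrid_spec : Claim_equal_createMAPPgrid := by
  intro ss _ _
  show createMAPPgrid ss = createMAPPgrid_alt ss
  exact pvMain ss
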